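-- pv_equiv track=rewrite | github.com/Keerthana430/ScrapeHunt | core/spiders/Shine_jobs.py | extract_proper_experience
-- ===== SOURCE A (Python) =====
-- def extract_proper_experience(lines):
--     """Extract experience requirement"""
--     for line in lines:
--         line_lower = line.lower()
--         if (any(exp_word in line_lower for exp_word in ['year', 'experience', 'fresher', 'exp', 'yrs']) and
--             len(line) < 50 and
--             any(char.isdigit() for char in line)):
--             return line.strip()
--
--     # Look for fresher specifically
--     for line in lines:
--         if 'fresher' in line.lower():
--             return 'Fresher'
--
--     return 'Not specified'
-- ===== SOURCE B (Python) =====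
-- def extract_proper_experience(lines):
--     """Extract experience requirement (single pass)"""
--     fresher_seen = False
--     for line in lines:
--         line_lower = line.lower()
--         if (any(w in line_lower for w in ['year', 'experience', 'fresher', 'exp', 'yrs'])
--                 and len(line) < 50
--                 and any(c.isdigit() for c in line)):
--             return line.strip()
--         if not fresher_seen and 'fresher' in line_lower:
--             fresher_seen = True
--     return 'Fresher' if fresher_seen else 'Not specified'
-- ===== Notes on version B (the rewrite author's own statement) =====
-- stated objective: alternative
-- what changed: The two sequential scans over lines are fused into one pass that returns a complex match immediately and records a 'fresher' flag consulted only after the whole pass.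
import Mathlib
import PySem

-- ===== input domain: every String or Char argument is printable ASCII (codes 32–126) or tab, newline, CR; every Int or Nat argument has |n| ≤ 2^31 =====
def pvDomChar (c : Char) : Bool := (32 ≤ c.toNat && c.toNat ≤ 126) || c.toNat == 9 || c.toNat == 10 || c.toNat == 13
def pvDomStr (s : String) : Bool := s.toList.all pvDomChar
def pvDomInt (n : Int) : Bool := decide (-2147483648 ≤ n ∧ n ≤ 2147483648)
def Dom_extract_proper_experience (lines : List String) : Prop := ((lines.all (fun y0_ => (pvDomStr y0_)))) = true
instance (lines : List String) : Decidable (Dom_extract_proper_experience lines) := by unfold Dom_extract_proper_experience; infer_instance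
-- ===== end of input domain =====

-- B fuses A's two sequential scans into one pass with a fresher flag; same return value, alternative decomposition.

-- ===== PORT A =====
-- A's first loop: return line.strip() on the first line meeting the complex condition.
def pvA_scan1 : List String → Option String
  | [] => none
  | line :: rest =>
    let lineLower := PySem.Str.lower line
    if (["year", "experience", "fresher", "exp", "yrs"].any (fun w => PySem.Str.isIn w lineLower)
        && decide (PySem.Str.len line < 50)
        && line.toList.any PySem.Chars.isdigit) then
      some (PySem.Str.strip line)
    else pvA_scan1 rest

-- A's second loop: first line containing 'fresher' (case-insensitive).
def pvA_scan2 : List String → String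
  | [] => "Not specified"
  | line :: rest =>
    if PySem.Str.isIn "fresher" (PySem.Str.lower line) then "Fresher" else pvA_scan2 rest

def extract_proper_experience (lines : List String) : String :=
  match pvA_scan1 lines with
  | some s => s
  | none => pvA_scan2 lines

-- ===== PORT B =====
-- Single pass carrying the fresher_seen flag; flag consulted only after the loop ends.
def pvB_go : List String → Bool → String
  | [], fresherSeen => if fresherSeen then "Fresher" else "Not specified"
  | line :: rest, fresherSeen =>
    let lineLower := PySem.Str.lower line
    if (["year", "experience", "fresher", "exp", "yrs"].any (fun w => PySem.Str.isIn w lineLower)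
        && decide (PySem.Str.len line < 50)
        && line.toList.any PySem.Chars.isdigit) then
      PySem.Str.strip line
    else if !fresherSeen && PySem.Str.isIn "fresher" lineLower then
      pvB_go rest true
    else
      pvB_go rest fresherSeen

def extract_proper_experience_alt (lines : List String) : String := pvB_go lines false

-- ===== PRECONDITION & SPEC =====
def Spec_extract_proper_experience (lines : List String) (out : String) : Prop := out = extract_proper_experience_alt lines
instance (lines : List String) (out : String) : Decidable (Spec_extract_proper_experience lines out) := by unfold Spec_extract_proper_experience; infer_instance

-- ===== CLAIM (what is proved, stated in full; the proofs are below) =====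
def Claim_equal_extract_proper_experience : Prop := ∀ (lines : List String), Dom_extract_proper_experience lines → Spec_extract_proper_experience lines (extract_proper_experience lines)

-- ===== LEMMAS AND PROOFS =====
theorem pvB_go_eq (ls : List String) (flag : Bool) :
    pvB_go ls flag =
      match pvA_scan1 ls with
      | some s => s
      | none => if flag then "Fresher" else pvA_scan2 ls := by
  induction ls generalizing flag with
  | nil => cases flag <;> rfl
  | cons line rest ih =>
    simp only [pvB_go, pvA_scan1, pvA_scan2]
    by_cases hc : (["year", "experience", "fresher", "exp", "yrs"].any
        (fun w => PySem.Str.isIn w (PySem.Str.lower line))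
        && decide (PySem.Str.len line < 50)
        && line.toList.any PySem.Chars.isdigit) = true
    · rw [if_pos hc, if_pos hc]
    · rw [if_neg hc, if_neg hc]
      cases flag with
      | true =>
        simp only [Bool.not_true, Bool.false_and, Bool.false_eq_true, if_false, ih]
        cases pvA_scan1 rest <;> rfl
      | false =>
        simp only [Bool.not_false, Bool.true_and, ih]
        by_cases hf : PySem.Str.isIn "fresher" (PySem.Str.lower line) = true
        · rw [if_pos hf, if_pos hf]
          cases pvA_scan1 rest <;> rfl
        · rw [if_neg hf, if_neg hf]

-- ===== VERDICT (by name: the statement is the Claim_ definition above) =====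
theorem extract_proper_experience_spec : Claim_equal_extract_proper_experience := by
  intro lines _
  unfold Spec_extract_proper_experience extract_proper_experience extract_proper_experience_alt
  rw [pvB_go_eq]
  cases h : pvA_scan1 lines <;> simp
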